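-- pv_equiv track=rewrite | github.com/PapsBurr/python-puzzles | puzzles.py | puzzle_1
-- ===== SOURCE A (Python) =====
-- def puzzle_1(num_list):
--     """
--     1. Check Nineteen and Five Occurrences
--
--     Write a Python program to find a list of integers with exactly two occurrences of nineteen and at least three occurrences of five. Return True otherwise False.
--     Input:
--     [19, 19, 15, 5, 3, 5, 5, 2]
--     Output:
--     True
--     Input:
--     [19, 15, 15, 5, 3, 3, 5, 2]
--     Output:
--     False
--     Input:
--     [19, 19, 5, 5, 5, 5, 5]
--     Output:
--     True
--     """
--     nineteen_counter = 0
--     five_counter = 0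
--     for num in num_list:
--         match num:
--             case 5:
--                 five_counter += 1
--             case 19:
--                 nineteen_counter += 1
--     if five_counter >= 3 and nineteen_counter == 2:
--         return True
--     return False
-- ===== SOURCE B (Python) =====
-- def puzzle_1(num_list):
--     # Sort-then-group: run-length encode the sorted list into (value, length)
--     # pairs; each value then forms exactly one run, so the occurrence
--     # conditions become length conditions on that value's run.
--     runs = []
--     for x in sorted(num_list):
--         if runs and runs[-1][0] == x:
--             runs[-1] = (x, runs[-1][1] + 1)
--         else:
--             runs.append((x, 1))
--     return (19, 2) in runs and any(v == 5 and k >= 3 for v, k in runs)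
-- ===== Notes on version B (the rewrite author's own statement) =====
-- stated objective: alternative
-- what changed: Instead of one traversal maintaining two scalar counters, B sorts the list and run-length encodes it into value/run-length pairs, then answers by checking that the run of nineteens has length exactly two and some run of fives has length at least three.
import Mathlib
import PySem

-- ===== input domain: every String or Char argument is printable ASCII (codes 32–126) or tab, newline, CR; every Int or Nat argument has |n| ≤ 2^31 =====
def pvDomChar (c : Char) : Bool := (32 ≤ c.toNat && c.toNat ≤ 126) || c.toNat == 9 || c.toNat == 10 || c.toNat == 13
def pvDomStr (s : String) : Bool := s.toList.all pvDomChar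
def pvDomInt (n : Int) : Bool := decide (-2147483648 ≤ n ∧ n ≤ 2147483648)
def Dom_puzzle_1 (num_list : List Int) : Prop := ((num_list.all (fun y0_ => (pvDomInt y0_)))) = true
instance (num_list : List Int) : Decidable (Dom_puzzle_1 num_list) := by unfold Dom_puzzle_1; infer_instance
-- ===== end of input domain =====

-- B replaces A's single-pass two-counter loop by sort + run-length encoding:
-- the answer is read off the (value, run-length) pairs (alternative; return value only).

-- ===== PORT A =====
-- one pass, two counters; match checks case 5 first, then case 19
def puzzle_1 (num_list : List Int) : Bool :=
  let p : Int × Int := num_list.foldl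
    (fun (acc : Int × Int) num =>
      if num = 5 then (acc.1, acc.2 + 1)
      else if num = 19 then (acc.1 + 1, acc.2)
      else acc)
    (0, 0)   -- (nineteen_counter, five_counter)
  if p.2 ≥ 3 ∧ p.1 = 2 then true else false

-- ===== PORT B =====
-- the loop body: extend the run list `runs` with one more element x
-- (runs[-1] → getLast?, runs[-1] = … → dropLast ++ […], runs.append → ++ […])
def pvRunStep (runs : List (Int × Int)) (x : Int) : List (Int × Int) :=
  match runs.getLast? with
  | some (v, k) => if v = x then runs.dropLast ++ [(x, k + 1)] else runs ++ [(x, 1)]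
  | none => runs ++ [(x, 1)]

def puzzle_1_alt (num_list : List Int) : Bool :=
  let runs := (PySem.List.sorted num_list (fun x => x) false).foldl pvRunStep []
  decide ((19, (2 : Int)) ∈ runs) && runs.any (fun p => decide (p.1 = 5) && decide (p.2 ≥ 3))

-- ===== PRECONDITION & SPEC =====
def Spec_puzzle_1 (num_list : List Int) (out : Bool) : Prop := out = puzzle_1_alt num_list
instance (num_list : List Int) (out : Bool) : Decidable (Spec_puzzle_1 num_list out) := by unfold Spec_puzzle_1; infer_instance

-- ===== CLAIM =====
def Claim_equal_puzzle_1 : Prop := ∀ (num_list : List Int), Dom_puzzle_1 num_list → Spec_puzzle_1 num_list (puzzle_1 num_list)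

-- ===== LEMMAS AND PROOFS =====

-- A's loop accumulator ends as the initial counters plus the two element counts
theorem puzzle_1_loop_counts (l : List Int) (a b : Int) :
    l.foldl
      (fun (acc : Int × Int) num =>
        if num = 5 then (acc.1, acc.2 + 1)
        else if num = 19 then (acc.1 + 1, acc.2)
        else acc)
      (a, b)
    = (a + (l.count 19 : Int), b + (l.count 5 : Int)) := by
  induction l generalizing a b with
  | nil => simp
  | cons x xs ih =>
    by_cases h5 : x = 5
    · subst h5; simp [List.foldl_cons, ih]; ring
    · by_cases h19 : x = 19
      · subst h19; simp [List.foldl_cons, h5, ih]; ring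
      · simp [List.foldl_cons, h5, h19, ih]

-- proof-side model of B's fold: recursive run-length encoding (front merge)
def pvRuns : List Int → List (Int × Int)
  | [] => []
  | x :: rest =>
    match pvRuns rest with
    | (w, k) :: tl => if w = x then (x, k + 1) :: tl else (x, 1) :: (w, k) :: tl
    | [] => [(x, 1)]

theorem pvRuns_cons_nil (x : Int) (rest : List Int) (h : pvRuns rest = []) :
    pvRuns (x :: rest) = [(x, 1)] := by
  simp only [pvRuns, h]

theorem pvRuns_cons_cons (x w k : Int) (rest : List Int) (tl : List (Int × Int))
    (h : pvRuns rest = (w, k) :: tl) :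
    pvRuns (x :: rest) = if w = x then (x, k + 1) :: tl else (x, 1) :: (w, k) :: tl := by
  simp only [pvRuns, h]

-- one step of the fold is one front-merge on the reversed run list
theorem pvRunStep_eq (R : List (Int × Int)) (x : Int) :
    pvRunStep R.reverse x
      = (match R with
         | (w, k) :: tl => if w = x then (x, k + 1) :: tl else (x, 1) :: (w, k) :: tl
         | [] => [(x, 1)]).reverse := by
  cases R with
  | nil => simp [pvRunStep]
  | cons p tl =>
    obtain ⟨w, k⟩ := p
    by_cases hwx : w = x <;>
      simp [pvRunStep, List.getLast?_concat, hwx, List.dropLast_concat]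

-- B's fold computes the reversed run-length encoding of the reversed input
theorem pvFoldl_runs (l : List Int) :
    l.foldl pvRunStep [] = (pvRuns l.reverse).reverse := by
  induction l using List.reverseRecOn with
  | nil => simp [pvRuns]
  | append_singleton ys x ih =>
    rw [List.foldl_append, List.foldl_cons, List.foldl_nil, ih, List.reverse_append]
    simp only [List.reverse_singleton, List.singleton_append]
    rw [pvRunStep_eq]
    cases hm : pvRuns ys.reverse with
    | nil => rw [pvRuns_cons_nil x _ hm]
    | cons p tl =>
      obtain ⟨w, k⟩ := p
      rw [pvRuns_cons_cons x w k _ tl hm]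

theorem pvRuns_cons_ne_nil (x : Int) (rest : List Int) : pvRuns (x :: rest) ≠ [] := by
  simp only [pvRuns]
  cases pvRuns rest with
  | nil => simp
  | cons p tl => obtain ⟨w, k⟩ := p; by_cases hwx : w = x <;> simp [hwx]

theorem pvRuns_key_mem (l : List Int) (v k : Int) (h : (v, k) ∈ pvRuns l) : v ∈ l := by
  induction l with
  | nil => simp [pvRuns] at h
  | cons x rest ih =>
    cases hm : pvRuns rest with
    | nil => rw [pvRuns_cons_nil x rest hm] at h; simp at h; simp [h.1]
    | cons p tl =>
      obtain ⟨w, k0⟩ := p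
      rw [pvRuns_cons_cons x w k0 rest tl hm] at h
      by_cases hwx : w = x
      · rw [if_pos hwx] at h
        rcases List.mem_cons.mp h with he | ht
        · injection he with h1 _; simp [h1]
        · exact List.mem_cons_of_mem _ (ih (hm ▸ List.mem_cons_of_mem _ ht))
      · rw [if_neg hwx] at h
        rcases List.mem_cons.mp h with he | ht
        · injection he with h1 _; simp [h1]
        · exact List.mem_cons_of_mem _ (ih (hm ▸ ht))

-- On a descending (≥-sorted) list, the runs have strictly decreasing keys and
-- (v, k) is a run exactly when v occurs k ≥ 1 times.
theorem pvRuns_spec (l : List Int) (h : l.Pairwise (fun a b => b ≤ a)) :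
    (pvRuns l).Pairwise (fun a b => b.1 < a.1) ∧
    ∀ v k : Int, ((v, k) ∈ pvRuns l ↔ (l.count v : Int) = k ∧ 1 ≤ k) := by
  induction l with
  | nil =>
    constructor
    · simp [pvRuns]
    · intro v k; simp [pvRuns]; omega
  | cons x rest ih =>
    have hrest : rest.Pairwise (fun a b => b ≤ a) := (List.pairwise_cons.mp h).2
    have hle : ∀ y ∈ rest, y ≤ x := (List.pairwise_cons.mp h).1
    obtain ⟨ihp, ihm⟩ := ih hrest
    cases hm : pvRuns rest with
    | nil =>
      have hre : rest = [] := by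
        cases rest with
        | nil => rfl
        | cons y t => exact absurd hm (pvRuns_cons_ne_nil y t)
      subst hre
      constructor
      · simp [pvRuns]
      · intro v k
        simp [pvRuns]
        constructor
        · rintro ⟨hv, hk⟩; subst hv; subst hk; simp
        · rintro ⟨hc, hk⟩
          by_cases hv : v = x
          · subst hv; simp at hc; omega
          · simp [List.count_cons, hv] at hc; omega
    | cons p tl =>
      obtain ⟨w, k0⟩ := p
      rw [hm] at ihp ihm
      have hwmem : w ∈ rest := pvRuns_key_mem rest w k0 (hm ▸ List.mem_cons_self ..)
      have hxw : w ≤ x := hle w hwmem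
      have hwk0 : (rest.count w : Int) = k0 ∧ 1 ≤ k0 := (ihm w k0).mp (List.mem_cons_self ..)
      have htlgt : ∀ q ∈ tl, q.1 < w := by
        intro q hq
        exact (List.pairwise_cons.mp ihp).1 q hq
      -- if v is not a key of runs rest then count v rest = 0
      have hnokey : ∀ v : Int, v ≠ w → (∀ q ∈ tl, v ≠ q.1) → rest.count v = 0 := by
        intro v hvw hvtl
        by_contra hc
        have h1 : 1 ≤ (rest.count v : Int) := by omega
        have : (v, (rest.count v : Int)) ∈ (w, k0) :: tl := (ihm v _).mpr ⟨rfl, h1⟩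
        rcases List.mem_cons.mp this with he | ht
        · cases he; exact hvw rfl
        · exact hvtl _ ht rfl
      by_cases hwx : w = x
      · subst hwx
        rw [pvRuns_cons_cons w w k0 rest tl hm, if_pos rfl]
        constructor
        · exact List.pairwise_cons.mpr ⟨fun q hq => htlgt q hq, (List.pairwise_cons.mp ihp).2⟩
        · intro v k
          constructor
          · intro hv
            rcases List.mem_cons.mp hv with he | ht
            · injection he with h1 h2
              subst h1
              constructor
              · simp [List.count_cons]; omega
              · omega
            · have hvq : v < w := htlgt _ ht
              have := (ihm v k).mp (List.mem_cons_of_mem _ ht)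
              constructor
              · have hvx : v ≠ w := by omega
                simp [List.count_cons, hvx]; omega
              · exact this.2
          · rintro ⟨hc, hk⟩
            by_cases hv : v = w
            · subst hv
              have : k = k0 + 1 := by simp [List.count_cons] at hc; omega
              subst this; exact List.mem_cons_self ..
            · have hcr : (rest.count v : Int) = k := by simp [List.count_cons, hv] at hc; omega
              have := (ihm v k).mpr ⟨hcr, hk⟩
              rcases List.mem_cons.mp this with he | ht
              · have hfst := congrArg Prod.fst he
                simp at hfst
                exact absurd hfst hv
              · exact List.mem_cons_of_mem _ ht
      · have hxltw : w < x := lt_of_le_of_ne hxw hwx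
        have hcx : rest.count x = 0 := hnokey x (fun e => hwx e.symm) (fun q hq e => by
          have := htlgt q hq; omega)
        rw [pvRuns_cons_cons x w k0 rest tl hm, if_neg hwx]
        constructor
        · refine List.pairwise_cons.mpr ⟨?_, ihp⟩
          intro q hq
          rcases List.mem_cons.mp hq with he | ht
          · subst he; exact hxltw
          · have := htlgt q ht; omega
        · intro v k
          constructor
          · intro hv
            rcases List.mem_cons.mp hv with he | ht
            · injection he with h1 h2
              subst h1
              constructor
              · simp [List.count_cons, hcx]; omega
              · omega
            · have hvk := (ihm v k).mp ht
              have hvnex : v ≠ x := by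
                rcases List.mem_cons.mp ht with he2 | ht2
                · injection he2 with h1 _; omega
                · have := htlgt _ ht2; simp at this ⊢; omega
              constructor
              · simp [List.count_cons, hvnex]; omega
              · exact hvk.2
          · rintro ⟨hc, hk⟩
            by_cases hv : v = x
            · subst hv
              have : k = 1 := by simp [hcx] at hc; omega
              subst this; exact List.mem_cons_self ..
            · have hcr : (rest.count v : Int) = k := by simp [List.count_cons, hv] at hc; omega
              exact List.mem_cons_of_mem _ ((ihm v k).mpr ⟨hcr, hk⟩)

-- ===== VERDICT =====
theorem puzzle_1_spec : Claim_equal_puzzle_1 := by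
  intro num_list _
  unfold Spec_puzzle_1 puzzle_1 puzzle_1_alt
  simp only [puzzle_1_loop_counts, zero_add, pvFoldl_runs]
  set s := PySem.List.sorted num_list (fun x => x) false with hs
  have hperm : s.Perm num_list := PySem.List.sorted_perm ..
  have hpw : s.Pairwise (fun a b => (a : Int) ≤ b) := PySem.List.sorted_pairwise ..
  have hpwr : s.reverse.Pairwise (fun a b : Int => b ≤ a) := by
    rw [List.pairwise_reverse]; exact hpw
  obtain ⟨_, hm⟩ := pvRuns_spec s.reverse hpwr
  have hcount : ∀ v : Int, s.reverse.count v = num_list.count v := by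
    intro v; rw [List.count_reverse, hperm.count_eq]
  have h19 : ((19, (2 : Int)) ∈ (pvRuns s.reverse).reverse) ↔ (num_list.count 19 : Int) = 2 := by
    rw [List.mem_reverse, hm 19 2, hcount]
    constructor
    · exact fun h => h.1
    · exact fun h => ⟨h, by omega⟩
  have h5 : (∃ p ∈ (pvRuns s.reverse).reverse, p.1 = 5 ∧ p.2 ≥ 3) ↔ (num_list.count 5 : Int) ≥ 3 := by
    constructor
    · rintro ⟨⟨v, k⟩, hp, hv, hk⟩
      simp at hv hk
      subst hv
      have := (hm 5 k).mp (List.mem_reverse.mp hp)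
      rw [hcount] at this
      omega
    · intro hc
      refine ⟨(5, (num_list.count 5 : Int)), ?_, rfl, by simpa using hc⟩
      rw [List.mem_reverse]
      exact (hm 5 _).mpr ⟨by rw [hcount], by omega⟩
  split_ifs with hcond
  · symm
    rw [Bool.and_eq_true, decide_eq_true_iff, List.any_eq_true]
    refine ⟨h19.mpr hcond.2, ?_⟩
    obtain ⟨p, hp, hv, hk⟩ := h5.mpr hcond.1
    exact ⟨p, hp, by rw [Bool.and_eq_true, decide_eq_true_iff, decide_eq_true_iff]; exact ⟨hv, hk⟩⟩
  · symm
    rw [Bool.and_eq_false_iff]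
    rcases Decidable.not_and_iff_not_or_not.mp hcond with hn5 | hn19
    · right
      rw [List.any_eq_false]
      intro p hp
      rw [Bool.and_eq_true, decide_eq_true_iff, decide_eq_true_iff]
      rintro ⟨hv, hk⟩
      exact hn5 (h5.mp ⟨p, hp, hv, hk⟩)
    · left
      rw [decide_eq_false_iff_not]
      exact fun hmem => hn19 (h19.mp hmem)
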